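-- pv_equiv track=rewrite | github.com/mglpsw/AgentEscala | backend/services/document_normalization_service.py | _validate_day_groups
-- ===== SOURCE A (Python) =====
-- from typing import Any, Dict, List, Optional, Tuple
--
-- def _validate_day_groups(rows: List[Dict[str, Any]]) -> Dict[str, List[str]]:
--     grouped: Dict[str, List[Dict[str, Any]]] = {}
--     for row in rows:
--         day_id = row.get("day_group_id") or row.get("date_iso") or "unknown"
--         grouped.setdefault(day_id, []).append(row)
--
--     validation: Dict[str, List[str]] = {}
--     for day_id, day_rows in grouped.items():
--         messages: List[str] = []
--         by_shift: Dict[str, int] = {}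
--         for row in day_rows:
--             sk = row.get("shift_kind") or "custom"
--             by_shift[sk] = by_shift.get(sk, 0) + 1
--             if row.get("match_status") == "ambiguous":
--                 messages.append("Nome ambíguo")
--             if row.get("crm_detected") is None:
--                 messages.append("CRM ausente")
--
--         if any(count > 1 for shift, count in by_shift.items() if shift in {"day", "intermediate", "night"}):
--             messages.append("Turno duplicado")
--         if len(day_rows) > 6:
--             messages.append("Número incomum de plantonistas")
--         validation[day_id] = list(dict.fromkeys(messages))
--
--     return validation
-- ===== SOURCE B (Python) =====
-- def _validate_day_groups(rows):
--     # Single pass: group and validate together, keeping per-day accumulators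
--     # (messages, shift counter, row count); duplicate-shift check by direct lookup.
--     days = {}
--     for row in rows:
--         day_id = row.get("day_group_id") or row.get("date_iso") or "unknown"
--         acc = days.get(day_id)
--         if acc is None:
--             acc = days[day_id] = [[], {}, 0]
--         sk = row.get("shift_kind") or "custom"
--         acc[1][sk] = acc[1].get(sk, 0) + 1
--         acc[2] += 1
--         if row.get("match_status") == "ambiguous":
--             acc[0].append("Nome ambíguo")
--         if row.get("crm_detected") is None:
--             acc[0].append("CRM ausente")
--     validation = {}
--     for day_id, (msgs, bs, n) in days.items():
--         if bs.get("day", 0) > 1 or bs.get("intermediate", 0) > 1 or bs.get("night", 0) > 1: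
--             msgs.append("Turno duplicado")
--         if n > 6:
--             msgs.append("Número incomum de plantonistas")
--         validation[day_id] = list(dict.fromkeys(msgs))
--     return validation
-- ===== Notes on version B (the rewrite author's own statement) =====
-- stated objective: alternative
-- what changed: B fuses A's two passes (group rows into per-day lists, then re-scan each list to validate) into one pass over rows that keeps per-day accumulators (messages, shift counter, row count), dropping the intermediate per-day row lists, and replaces A's scan of by_shift.items() by three direct lookups.
import Mathlib
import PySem

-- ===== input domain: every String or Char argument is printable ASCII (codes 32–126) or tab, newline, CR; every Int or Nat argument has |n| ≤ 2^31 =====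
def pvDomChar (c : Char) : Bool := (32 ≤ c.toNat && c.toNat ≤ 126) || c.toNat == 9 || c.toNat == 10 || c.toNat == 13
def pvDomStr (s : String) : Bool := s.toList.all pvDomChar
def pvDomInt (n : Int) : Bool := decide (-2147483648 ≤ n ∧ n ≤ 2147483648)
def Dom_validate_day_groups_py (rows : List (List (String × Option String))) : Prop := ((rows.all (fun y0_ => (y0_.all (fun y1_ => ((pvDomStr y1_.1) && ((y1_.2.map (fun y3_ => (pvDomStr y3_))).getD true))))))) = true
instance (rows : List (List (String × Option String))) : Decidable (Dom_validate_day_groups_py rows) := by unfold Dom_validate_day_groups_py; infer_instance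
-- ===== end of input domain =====

-- B fuses A's two passes (group rows by day, then validate each group) into one
-- pass keeping per-day accumulators (messages, shift counter, count) and replaces
-- A's scan of by_shift.items() by three direct lookups; alternative decomposition.

-- row.get(k): first match in the row's association list; a stored None and a
-- missing key both give none
def pvRowGet (row : List (String × Option String)) (k : String) : Option String :=
  ((PySem.Dict.mk row).get? k).join

-- `v or alt` for an Optional[str] v: None and "" are falsy
def pvOrStr (v : Option String) (alt : String) : String :=
  match v with
  | some s => if s = "" then alt else s
  | none => alt

def pvDayId (row : List (String × Option String)) : String :=
  pvOrStr (pvRowGet row "day_group_id") (pvOrStr (pvRowGet row "date_iso") "unknown")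

def pvShiftKind (row : List (String × Option String)) : String :=
  pvOrStr (pvRowGet row "shift_kind") "custom"

-- ===== PORT A =====
-- grouped.setdefault(day_id, []).append(row)
def aGroupStep (d : PySem.Dict String (List (List (String × Option String))))
    (row : List (String × Option String)) : PySem.Dict String (List (List (String × Option String))) :=
  d.modify (pvDayId row) [] (fun l => l ++ [row])

-- body of A's inner `for row in day_rows` loop over state (messages, by_shift)
def aInnerStep (mb : List String × PySem.Dict String Int)
    (row : List (String × Option String)) : List String × PySem.Dict String Int :=
  let sk := pvShiftKind row
  let bs := mb.2.modify sk 0 (· + 1)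
  let ms := mb.1
  let ms := if pvRowGet row "match_status" == some "ambiguous" then ms ++ ["Nome ambíguo"] else ms
  let ms := if pvRowGet row "crm_detected" == none then ms ++ ["CRM ausente"] else ms
  (ms, bs)

-- messages A computes for one day group (before dedup)
def aDayMsgs (day_rows : List (List (String × Option String))) : List String :=
  let mb := day_rows.foldl aInnerStep ([], PySem.Dict.empty)
  let messages := mb.1
  let messages := if mb.2.items.any (fun q => (q.1 == "day" || q.1 == "intermediate" || q.1 == "night") && decide (q.2 > 1))
    then messages ++ ["Turno duplicado"] else messages
  if day_rows.length > 6 then messages ++ ["Número incomum de plantonistas"] else messages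

def validate_day_groups_py (rows : List (List (String × Option String))) : List (String × List String) :=
  let grouped := rows.foldl aGroupStep PySem.Dict.empty
  let validation := grouped.items.foldl
    (fun v p => v.insert p.1 (PySem.Set.ofList (aDayMsgs p.2))) PySem.Dict.empty
  validation.items

-- ===== PORT B =====
-- per-row messages (B appends them as it meets each row)
def pvRowMsgs (row : List (String × Option String)) : List String :=
  (if pvRowGet row "match_status" == some "ambiguous" then ["Nome ambíguo"] else []) ++
  (if pvRowGet row "crm_detected" == none then ["CRM ausente"] else [])

-- B's single-pass step: fetch-or-create the day accumulator and update it
def bStep (d : PySem.Dict String (List String × PySem.Dict String Int × Nat))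
    (row : List (String × Option String)) : PySem.Dict String (List String × PySem.Dict String Int × Nat) :=
  d.modify (pvDayId row) ([], PySem.Dict.empty, 0) (fun acc =>
    (acc.1 ++ pvRowMsgs row, acc.2.1.modify (pvShiftKind row) 0 (· + 1), acc.2.2 + 1))

-- B's finalisation of one day accumulator (before dedup)
def bFinish (acc : List String × PySem.Dict String Int × Nat) : List String :=
  let msgs := acc.1
  let bs := acc.2.1
  let msgs := if bs.getD "day" 0 > 1 || bs.getD "intermediate" 0 > 1 || bs.getD "night" 0 > 1
    then msgs ++ ["Turno duplicado"] else msgs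
  if acc.2.2 > 6 then msgs ++ ["Número incomum de plantonistas"] else msgs

def validate_day_groups_py_alt (rows : List (List (String × Option String))) : List (String × List String) :=
  let days := rows.foldl bStep PySem.Dict.empty
  (days.items.foldl
    (fun v p => v.insert p.1 (PySem.Set.ofList (bFinish p.2))) PySem.Dict.empty).items

-- ===== PRECONDITION & SPEC =====
def Spec_validate_day_groups_py (rows : List (List (String × Option String))) (out : List (String × List String)) : Prop := out = validate_day_groups_py_alt rows
instance (rows : List (List (String × Option String))) (out : List (String × List String)) : Decidable (Spec_validate_day_groups_py rows out) := by unfold Spec_validate_day_groups_py; infer_instance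

-- ===== CLAIM (what is proved, stated in full; the proofs are below) =====
def Claim_equal_validate_day_groups_py : Prop := ∀ (rows : List (List (String × Option String))), Dom_validate_day_groups_py rows → Spec_validate_day_groups_py rows (validate_day_groups_py rows)

-- ===== LEMMAS AND PROOFS =====

-- a fold of modify-at-a-computed-key, read back at c, is a fold over the rows keyed c
lemma pv_getD_foldl_modify {α β : Type} (l : List α) (key : α → String) (d0 : β)
    (f : α → β → β) (d : PySem.Dict String β) (c : String) :
    (l.foldl (fun d a => d.modify (key a) d0 (f a)) d).getD c d0
      = (l.filter (fun a => key a == c)).foldl (fun b a => f a b) (d.getD c d0) := by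
  induction l generalizing d with
  | nil => rfl
  | cons a t ih =>
    simp only [List.foldl_cons, List.filter_cons]
    rw [ih, PySem.Dict.getD_modify]
    by_cases h : key a = c
    · simp [h]
    · have h' : ¬ c = key a := fun e => h e.symm
      simp [h, h']

lemma pv_foldl_snoc {α : Type} (l acc : List α) :
    l.foldl (fun b a => b ++ [a]) acc = acc ++ l := by
  induction l generalizing acc with
  | nil => simp
  | cons a t ih => simp [ih]

-- B's fused per-day fold equals A's inner fold plus a row count
lemma pv_fused (l : List (List (String × Option String)))
    (ms : List String) (bs : PySem.Dict String Int) (n : Nat) :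
    l.foldl (fun acc row =>
        (acc.1 ++ pvRowMsgs row, acc.2.1.modify (pvShiftKind row) 0 (· + 1), acc.2.2 + 1))
      (ms, bs, n)
      = ((l.foldl aInnerStep (ms, bs)).1, (l.foldl aInnerStep (ms, bs)).2, n + l.length) := by
  induction l generalizing ms bs n with
  | nil => simp
  | cons a t ih =>
    have h : aInnerStep (ms, bs) a
        = (ms ++ pvRowMsgs a, bs.modify (pvShiftKind a) 0 (· + 1)) := by
      simp only [aInnerStep, pvRowMsgs]
      split_ifs <;> simp
    simp only [List.foldl_cons, List.length_cons, ih, h, Prod.mk.injEq]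
    exact ⟨trivial, trivial, by omega⟩

-- the second component of A's inner fold is a pure counting fold
lemma pv_inner_snd (l : List (List (String × Option String)))
    (ms : List String) (bs : PySem.Dict String Int) :
    (l.foldl aInnerStep (ms, bs)).2
      = l.foldl (fun bs row => bs.modify (pvShiftKind row) 0 (· + 1)) bs := by
  induction l generalizing ms bs with
  | nil => rfl
  | cons a t ih =>
    simp only [List.foldl_cons]
    rw [ih]
    rfl

-- scanning items for a duplicated day/intermediate/night shift = three lookups
lemma pv_any_items (bs : PySem.Dict String Int) (hnd : bs.keys.Nodup) :
    bs.items.any (fun q => (q.1 == "day" || q.1 == "intermediate" || q.1 == "night") && decide (q.2 > 1))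
      = (decide (bs.getD "day" 0 > 1) || decide (bs.getD "intermediate" 0 > 1) || decide (bs.getD "night" 0 > 1)) := by
  rw [Bool.eq_iff_iff]
  simp only [List.any_eq_true, Bool.or_eq_true, Bool.and_eq_true, decide_eq_true_eq, beq_iff_eq]
  constructor
  · rintro ⟨⟨k, v⟩, hq, hk, hv⟩
    have hg : bs.getD k 0 = v := PySem.Dict.getD_of_mem_items bs hq hnd 0
    rcases hk with (h | h) | h <;> subst h
    · exact Or.inl (Or.inl (by rw [hg]; exact hv))
    · exact Or.inl (Or.inr (by rw [hg]; exact hv))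
    · exact Or.inr (by rw [hg]; exact hv)
  · have aux : ∀ s : String, bs.getD s 0 > 1 → ∃ v : Int, (s, v) ∈ bs.items ∧ v > 1 := by
      intro s hs
      cases hg : bs.get? s with
      | none =>
        rw [PySem.Dict.getD_of_get?_eq_none bs 0 hg] at hs
        omega
      | some v =>
        refine ⟨v, PySem.Dict.mem_items_of_get?_eq_some bs hg, ?_⟩
        rw [PySem.Dict.getD_of_get?_eq_some bs 0 hg] at hs
        exact hs
    rintro ((h | h) | h)
    · obtain ⟨v, hm, hv⟩ := aux _ h
      exact ⟨("day", v), hm, Or.inl (Or.inl rfl), hv⟩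
    · obtain ⟨v, hm, hv⟩ := aux _ h
      exact ⟨("intermediate", v), hm, Or.inl (Or.inr rfl), hv⟩
    · obtain ⟨v, hm, hv⟩ := aux _ h
      exact ⟨("night", v), hm, Or.inr rfl, hv⟩

-- per-key equality of the two per-day computations
lemma pv_day_eq (rows : List (List (String × Option String))) (c : String) :
    aDayMsgs ((rows.foldl aGroupStep PySem.Dict.empty).getD c [])
      = bFinish ((rows.foldl bStep PySem.Dict.empty).getD c ([], PySem.Dict.empty, 0)) := by
  have hA : (rows.foldl aGroupStep PySem.Dict.empty).getD c []
      = (rows.filter (fun r => pvDayId r == c)).foldl (fun b a => b ++ [a]) [] :=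
    pv_getD_foldl_modify rows pvDayId [] (fun row l => l ++ [row]) PySem.Dict.empty c
  rw [pv_foldl_snoc] at hA
  simp only [List.nil_append] at hA
  have hB : (rows.foldl bStep PySem.Dict.empty).getD c ([], PySem.Dict.empty, 0)
      = (rows.filter (fun r => pvDayId r == c)).foldl
          (fun acc row => (acc.1 ++ pvRowMsgs row, acc.2.1.modify (pvShiftKind row) 0 (· + 1), acc.2.2 + 1))
          ([], PySem.Dict.empty, 0) :=
    pv_getD_foldl_modify rows pvDayId ([], PySem.Dict.empty, 0)
      (fun row acc => (acc.1 ++ pvRowMsgs row, acc.2.1.modify (pvShiftKind row) 0 (· + 1), acc.2.2 + 1))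
      PySem.Dict.empty c
  rw [pv_fused] at hB
  set fr := rows.filter (fun r => pvDayId r == c) with hfr
  set mb := fr.foldl aInnerStep ([], PySem.Dict.empty) with hmb
  have hnd : mb.2.keys.Nodup := by
    rw [hmb, pv_inner_snd]
    exact PySem.Dict.nodup_keys_foldl_modify_key fr pvShiftKind 0 (fun _ _ => (· + 1))
      PySem.Dict.empty PySem.Dict.nodup_keys_empty
  rw [hA, hB]
  simp only [aDayMsgs, bFinish, ← hmb]
  rw [pv_any_items mb.2 hnd]
  norm_num
-- ===== VERDICT (by name: the statement is the Claim_ definition above) =====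
theorem validate_day_groups_py_spec : Claim_equal_validate_day_groups_py := by
  intro rows _
  show validate_day_groups_py rows = validate_day_groups_py_alt rows
  simp only [validate_day_groups_py, validate_day_groups_py_alt]
  have hndA : (rows.foldl aGroupStep PySem.Dict.empty).keys.Nodup :=
    PySem.Dict.nodup_keys_foldl_modify_key rows pvDayId [] (fun _ row => fun l => l ++ [row])
      PySem.Dict.empty PySem.Dict.nodup_keys_empty
  have hndB : (rows.foldl bStep PySem.Dict.empty).keys.Nodup :=
    PySem.Dict.nodup_keys_foldl_modify_key rows pvDayId ([], PySem.Dict.empty, 0)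
      (fun _ row => fun acc => (acc.1 ++ pvRowMsgs row, acc.2.1.modify (pvShiftKind row) 0 (· + 1), acc.2.2 + 1))
      PySem.Dict.empty PySem.Dict.nodup_keys_empty
  have hkeys : (rows.foldl aGroupStep PySem.Dict.empty).keys = (rows.foldl bStep PySem.Dict.empty).keys := by
    have h1 : (rows.foldl aGroupStep PySem.Dict.empty).keys
        = PySem.Set.update PySem.Dict.empty.keys (rows.map pvDayId) :=
      PySem.Dict.keys_foldl_modify_key rows pvDayId [] (fun _ row => fun l => l ++ [row]) PySem.Dict.empty
    have h2 : (rows.foldl bStep PySem.Dict.empty).keys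
        = PySem.Set.update PySem.Dict.empty.keys (rows.map pvDayId) :=
      PySem.Dict.keys_foldl_modify_key rows pvDayId ([], PySem.Dict.empty, 0)
        (fun _ row => fun acc => (acc.1 ++ pvRowMsgs row, acc.2.1.modify (pvShiftKind row) 0 (· + 1), acc.2.2 + 1))
        PySem.Dict.empty
    exact h1.trans h2.symm
  rw [PySem.Dict.items_eq_map_keys _ hndA [],
      PySem.Dict.items_eq_map_keys _ hndB ([], PySem.Dict.empty, 0)]
  simp only [List.foldl_map]
  have hstep : (fun (v : PySem.Dict String (List String)) (k : String) =>
        v.insert k (PySem.Set.ofList (aDayMsgs ((rows.foldl aGroupStep PySem.Dict.empty).getD k []))))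
      = (fun (v : PySem.Dict String (List String)) (k : String) =>
        v.insert k (PySem.Set.ofList (bFinish ((rows.foldl bStep PySem.Dict.empty).getD k ([], PySem.Dict.empty, 0))))) := by
    funext v k
    rw [pv_day_eq]
  rw [hkeys, hstep]
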